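-- pv_equiv track=rewrite | github.com/KingslayerGC/Reading-Notebook | python 数据结构与算法/图与图算法/应用_最小生成树.py | _findmatmin
-- ===== SOURCE A (Python) =====
-- def _findmin(alist):
--     minind = 0
--     for i in range(len(alist)):
--         if alist[i]==0:
--             pass
--         elif alist[minind]>alist[i] or alist[minind]==0:
--             minind = i
--     return minind
--
-- def _findmatmin(mat):
--     q, t = 0, 0
--     for i in range(len(mat[0])):
--         j = _findmin(mat[i])
--         if mat[i][j] == 0:
--             pass
--         elif mat[q][t]>mat[i][j] or mat[q][t]==0:
--             q, t = i, j
--     return q, t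
-- ===== SOURCE B (Python) =====
-- def _findmatmin(mat):
--     q, t = 0, 0
--     for i in range(len(mat[0])):
--         row = mat[i]
--         for j in range(len(row)):
--             v = row[j]
--             if v != 0 and (mat[q][t] == 0 or mat[q][t] > v):
--                 q, t = i, j
--     return q, t
-- ===== Notes on version B (the rewrite author's own statement) =====
-- stated objective: simpler
-- what changed: Drops the per-row _findmin helper and its intermediate per-row minimum entirely: a single nested scan tracks the global minimum-nonzero position in one (q,t) accumulator, comparing each nonzero entry directly against the current best.
import Mathlib
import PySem

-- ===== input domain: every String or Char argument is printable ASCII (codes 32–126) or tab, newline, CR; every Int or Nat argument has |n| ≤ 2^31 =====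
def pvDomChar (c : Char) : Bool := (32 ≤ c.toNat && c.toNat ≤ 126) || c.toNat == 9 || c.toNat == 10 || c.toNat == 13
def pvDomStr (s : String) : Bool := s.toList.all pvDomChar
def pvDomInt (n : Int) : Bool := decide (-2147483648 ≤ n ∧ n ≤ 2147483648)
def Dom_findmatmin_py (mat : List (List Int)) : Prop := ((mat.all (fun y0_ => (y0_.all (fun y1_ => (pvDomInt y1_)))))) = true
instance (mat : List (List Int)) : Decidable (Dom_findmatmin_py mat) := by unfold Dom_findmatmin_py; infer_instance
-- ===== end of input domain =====

-- B inlines A's per-row _findmin helper into one nested scan with a single (q,t)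
-- accumulator (objective: simpler); equivalence of the RETURN value is proved below.

-- ===== PORT A =====
-- helper: Python _findmin
def findmin_py (alist : List Int) : Int :=
  (PySem.List.pyRange 0 (alist.length : Int) 1).foldl
    (fun minind i =>
      if PySem.List.pyGetD alist i 0 = 0 then minind
      else if PySem.List.pyGetD alist minind 0 > PySem.List.pyGetD alist i 0 ∨
              PySem.List.pyGetD alist minind 0 = 0 then i
      else minind) 0

def findmatmin_py (mat : List (List Int)) : Int × Int :=
  (PySem.List.pyRange 0 ((PySem.List.pyGetD mat 0 []).length : Int) 1).foldl
    (fun qt i =>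
      let j := findmin_py (PySem.List.pyGetD mat i [])
      if PySem.List.pyGetD (PySem.List.pyGetD mat i []) j 0 = 0 then qt
      else if PySem.List.pyGetD (PySem.List.pyGetD mat qt.1 []) qt.2 0 >
                PySem.List.pyGetD (PySem.List.pyGetD mat i []) j 0 ∨
              PySem.List.pyGetD (PySem.List.pyGetD mat qt.1 []) qt.2 0 = 0 then (i, j)
      else qt) (0, 0)

-- ===== PORT B =====
def findmatmin_py_alt (mat : List (List Int)) : Int × Int :=
  (PySem.List.pyRange 0 ((PySem.List.pyGetD mat 0 []).length : Int) 1).foldl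
    (fun qt i =>
      let row := PySem.List.pyGetD mat i []
      (PySem.List.pyRange 0 (row.length : Int) 1).foldl
        (fun qt j =>
          if PySem.List.pyGetD row j 0 ≠ 0 ∧
             (PySem.List.pyGetD (PySem.List.pyGetD mat qt.1 []) qt.2 0 = 0 ∨
              PySem.List.pyGetD (PySem.List.pyGetD mat qt.1 []) qt.2 0 >
                PySem.List.pyGetD row j 0)
          then (i, j) else qt) qt) (0, 0)

-- ===== PRECONDITION & SPEC =====
-- Pre_ = exactly the inputs on which Python A returns normally: A indexes mat[0], then
-- mat[i] for i < len(mat[0]), and mat[i][0] when row i is empty — so it raises IndexError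
-- on the empty matrix, when len(mat[0]) > len(mat), or when a scanned row is empty.
def Pre_findmatmin_py (mat : List (List Int)) : Prop :=
  mat ≠ [] ∧ mat.headI.length ≤ mat.length ∧ ∀ r ∈ mat.take mat.headI.length, r ≠ []
instance (mat : List (List Int)) : Decidable (Pre_findmatmin_py mat) := by
  unfold Pre_findmatmin_py; infer_instance
def pvWitness_findmatmin_py : List (List Int) := [[1, 2], [3, 0]]

def Spec_findmatmin_py (mat : List (List Int)) (out : Int × Int) : Prop := out = findmatmin_py_alt mat
instance (mat : List (List Int)) (out : Int × Int) : Decidable (Spec_findmatmin_py mat out) := by unfold Spec_findmatmin_py; infer_instance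

-- ===== CLAIM (what is proved, stated in full; the proofs are below) =====
def Claim_equal_findmatmin_py : Prop := ∀ (mat : List (List Int)), Dom_findmatmin_py mat → Pre_findmatmin_py mat → Spec_findmatmin_py mat (findmatmin_py mat)

-- ===== LEMMAS AND PROOFS =====

-- prefix of A's _findmin fold (first k iterations)
def pvFm (r : List Int) (k : Nat) : Int :=
  (PySem.List.pyRange 0 (k : Int) 1).foldl
    (fun minind i =>
      if PySem.List.pyGetD r i 0 = 0 then minind
      else if PySem.List.pyGetD r minind 0 > PySem.List.pyGetD r i 0 ∨
              PySem.List.pyGetD r minind 0 = 0 then i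
      else minind) 0

-- prefix of B's inner fold over row r at outer index i (first k iterations)
def pvB (mat : List (List Int)) (i : Int) (r : List Int) (k : Nat) (s : Int × Int) : Int × Int :=
  (PySem.List.pyRange 0 (k : Int) 1).foldl
    (fun qt j =>
      if PySem.List.pyGetD r j 0 ≠ 0 ∧
         (PySem.List.pyGetD (PySem.List.pyGetD mat qt.1 []) qt.2 0 = 0 ∨
          PySem.List.pyGetD (PySem.List.pyGetD mat qt.1 []) qt.2 0 >
            PySem.List.pyGetD r j 0)
      then (i, j) else qt) s

theorem pvFm_succ (r : List Int) (k : Nat) :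
    pvFm r (k + 1) =
      (if PySem.List.pyGetD r (k : Int) 0 = 0 then pvFm r k
       else if PySem.List.pyGetD r (pvFm r k) 0 > PySem.List.pyGetD r (k : Int) 0 ∨
               PySem.List.pyGetD r (pvFm r k) 0 = 0 then (k : Int)
       else pvFm r k) := by
  unfold pvFm
  rw [show ((k + 1 : Nat) : Int) = (k : Int) + 1 by push_cast; ring,
      PySem.List.pyRange_one_succ_right (by exact_mod_cast Int.natCast_nonneg k),
      List.foldl_append]
  simp

theorem pvB_succ (mat : List (List Int)) (i : Int) (r : List Int) (k : Nat) (s : Int × Int) :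
    pvB mat i r (k + 1) s =
      (if PySem.List.pyGetD r (k : Int) 0 ≠ 0 ∧
          (PySem.List.pyGetD (PySem.List.pyGetD mat (pvB mat i r k s).1 []) (pvB mat i r k s).2 0 = 0 ∨
           PySem.List.pyGetD (PySem.List.pyGetD mat (pvB mat i r k s).1 []) (pvB mat i r k s).2 0 >
             PySem.List.pyGetD r (k : Int) 0)
       then (i, (k : Int)) else pvB mat i r k s) := by
  unfold pvB
  rw [show ((k + 1 : Nat) : Int) = (k : Int) + 1 by push_cast; ring,
      PySem.List.pyRange_one_succ_right (by exact_mod_cast Int.natCast_nonneg k),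
      List.foldl_append]
  simp

-- joint invariant of A's _findmin prefix and B's inner-loop prefix
theorem pv_inv (mat : List (List Int)) (i : Int) (r : List Int)
    (hr : PySem.List.pyGetD mat i [] = r) (k : Nat) :
    (0 ≤ pvFm r k ∧ pvFm r k < max 1 (k : Int)) ∧
    ((∀ j : Nat, j < k → r.getD j 0 = 0) → pvFm r k = 0 ∧ ∀ s, pvB mat i r k s = s) ∧
    (¬ (∀ j : Nat, j < k → r.getD j 0 = 0) →
      PySem.List.pyGetD r (pvFm r k) 0 ≠ 0 ∧
      ∀ s : Int × Int, pvB mat i r k s =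
        if PySem.List.pyGetD (PySem.List.pyGetD mat s.1 []) s.2 0 > PySem.List.pyGetD r (pvFm r k) 0 ∨
           PySem.List.pyGetD (PySem.List.pyGetD mat s.1 []) s.2 0 = 0
        then (i, pvFm r k) else s) := by
  induction k with
  | zero =>
    have h1 : pvFm r 0 = 0 := by
      unfold pvFm
      rw [show ((0 : Nat) : Int) = (0 : Int) by norm_num, PySem.List.pyRange_one_eq_nil le_rfl]
      rfl
    have h2 : ∀ s, pvB mat i r 0 s = s := by
      intro s
      unfold pvB
      rw [show ((0 : Nat) : Int) = (0 : Int) by norm_num, PySem.List.pyRange_one_eq_nil le_rfl]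
      rfl
    refine ⟨⟨by rw [h1], by rw [h1]; exact lt_max_of_lt_left one_pos⟩,
      fun _ => ⟨h1, h2⟩,
      fun h => absurd (fun j hj => absurd hj (Nat.not_lt_zero j)) h⟩
  | succ k ih =>
    obtain ⟨⟨hfm0, hfmlt⟩, hzero, hnz⟩ := ih
    have hcast : PySem.List.pyGetD r ((k : Nat) : Int) 0 = r.getD k 0 := by
      simp [PySem.List.pyGetD_natCast]
    by_cases hz : ∀ j : Nat, j < k → r.getD j 0 = 0
    · obtain ⟨hfm, hB⟩ := hzero hz
      by_cases hrk : r.getD k 0 = 0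
      · -- all of r[0..k] is zero: nothing changes
        have hz' : ∀ j : Nat, j < k + 1 → r.getD j 0 = 0 := by
          intro j hj
          rcases Nat.lt_succ_iff_lt_or_eq.mp hj with h | h
          · exact hz j h
          · rw [h]; exact hrk
        have hfm' : pvFm r (k + 1) = 0 := by
          rw [pvFm_succ, hcast, if_pos hrk, hfm]
        have hB' : ∀ s, pvB mat i r (k + 1) s = s := by
          intro s
          rw [pvB_succ, hB s, hcast, if_neg (fun h => h.1 hrk)]
        exact ⟨⟨by rw [hfm'], by rw [hfm']; exact lt_max_of_lt_left one_pos⟩,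
          fun _ => ⟨hfm', hB'⟩, fun h => absurd hz' h⟩
      · -- first nonzero entry appears at index k
        have hfm' : pvFm r (k + 1) = (k : Int) := by
          rw [pvFm_succ, hcast, if_neg hrk, hfm]
          by_cases hk0 : k = 0
          · subst hk0; split <;> rfl
          · have h0 : r.getD 0 0 = 0 := hz 0 (Nat.pos_of_ne_zero hk0)
            rw [if_pos (Or.inr (by simpa [PySem.List.pyGetD_zero] using h0))]
        have hz' : ¬ ∀ j : Nat, j < k + 1 → r.getD j 0 = 0 :=
          fun h => absurd (h k (Nat.lt_succ_self k)) hrk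
        have hw' : PySem.List.pyGetD r (pvFm r (k + 1)) 0 ≠ 0 := by
          rw [hfm', hcast]; exact hrk
        have hB' : ∀ s : Int × Int, pvB mat i r (k + 1) s =
            if PySem.List.pyGetD (PySem.List.pyGetD mat s.1 []) s.2 0 > PySem.List.pyGetD r (pvFm r (k + 1)) 0 ∨
               PySem.List.pyGetD (PySem.List.pyGetD mat s.1 []) s.2 0 = 0
            then (i, pvFm r (k + 1)) else s := by
          intro s
          rw [pvB_succ, hB s, hfm', hcast]
          have hiff : (r.getD k 0 ≠ 0 ∧
              (PySem.List.pyGetD (PySem.List.pyGetD mat s.1 []) s.2 0 = 0 ∨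
               PySem.List.pyGetD (PySem.List.pyGetD mat s.1 []) s.2 0 > r.getD k 0)) ↔
              (PySem.List.pyGetD (PySem.List.pyGetD mat s.1 []) s.2 0 > r.getD k 0 ∨
               PySem.List.pyGetD (PySem.List.pyGetD mat s.1 []) s.2 0 = 0) := by
            constructor
            · rintro ⟨_, h | h⟩
              · exact Or.inr h
              · exact Or.inl h
            · rintro (h | h)
              · exact ⟨hrk, Or.inr h⟩
              · exact ⟨hrk, Or.inl h⟩
          rw [if_congr hiff rfl rfl]
        exact ⟨⟨by rw [hfm']; exact Int.natCast_nonneg k,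
          by rw [hfm']; exact lt_max_of_lt_right (by push_cast; omega)⟩,
          fun h => absurd h hz', fun _ => ⟨hw', hB'⟩⟩
    · obtain ⟨hw, hB⟩ := hnz hz
      have hz' : ¬ ∀ j : Nat, j < k + 1 → r.getD j 0 = 0 :=
        fun h => hz (fun j hj => h j (Nat.lt_succ_of_lt hj))
      have hVfm : PySem.List.pyGetD (PySem.List.pyGetD mat i []) (pvFm r k) 0 =
          PySem.List.pyGetD r (pvFm r k) 0 := by rw [hr]
      by_cases hrk : r.getD k 0 = 0
      · -- r[k] = 0: both folds skip the step
        have hfm' : pvFm r (k + 1) = pvFm r k := by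
          rw [pvFm_succ, hcast, if_pos hrk]
        have hB' : ∀ s, pvB mat i r (k + 1) s = pvB mat i r k s := by
          intro s
          rw [pvB_succ, hcast, if_neg (fun h => h.1 hrk)]
        refine ⟨⟨by rw [hfm']; exact hfm0,
          by rw [hfm']; exact lt_of_lt_of_le hfmlt (max_le_max le_rfl (by push_cast; omega))⟩,
          fun h => absurd h hz', fun _ => ⟨by rw [hfm']; exact hw, fun s => by rw [hB' s, hfm', hB s]⟩⟩
      · by_cases hwc : PySem.List.pyGetD r (pvFm r k) 0 > r.getD k 0
        · -- strictly smaller nonzero minimum at index k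
          have hfm' : pvFm r (k + 1) = (k : Int) := by
            rw [pvFm_succ, hcast, if_neg hrk, if_pos (Or.inl hwc)]
          refine ⟨⟨by rw [hfm']; exact Int.natCast_nonneg k,
            by rw [hfm']; exact lt_max_of_lt_right (by push_cast; omega)⟩,
            fun h => absurd h hz', fun _ => ⟨by rw [hfm', hcast]; exact hrk, ?_⟩⟩
          intro s
          rw [pvB_succ, hB s, hfm', hcast]
          by_cases hs : PySem.List.pyGetD (PySem.List.pyGetD mat s.1 []) s.2 0 > PySem.List.pyGetD r (pvFm r k) 0 ∨
              PySem.List.pyGetD (PySem.List.pyGetD mat s.1 []) s.2 0 = 0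
          · rw [if_pos hs]
            rw [if_pos ⟨hrk, Or.inr (by rw [hVfm]; exact hwc)⟩]
            rw [if_pos ?_]
            rcases hs with h | h
            · exact Or.inl (lt_trans hwc h)
            · exact Or.inr h
          · rw [if_neg hs]
            push Not at hs
            obtain ⟨hle, hne⟩ := hs
            by_cases hsc : PySem.List.pyGetD (PySem.List.pyGetD mat s.1 []) s.2 0 > r.getD k 0
            · rw [if_pos ⟨hrk, Or.inr hsc⟩, if_pos (Or.inl hsc)]
            · rw [if_neg ?_, if_neg ?_]
              · rintro (h | h)
                · exact hsc h
                · exact hne h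
              · rintro ⟨_, h | h⟩
                · exact hne h
                · exact hsc h
        · -- r[k] nonzero but not below the current minimum: nothing changes
          have hfm' : pvFm r (k + 1) = pvFm r k := by
            rw [pvFm_succ, hcast, if_neg hrk, if_neg ?_]
            rintro (h | h)
            · exact hwc h
            · exact hw h
          refine ⟨⟨by rw [hfm']; exact hfm0,
            by rw [hfm']; exact lt_of_lt_of_le hfmlt (max_le_max le_rfl (by push_cast; omega))⟩,
            fun h => absurd h hz', fun _ => ⟨by rw [hfm']; exact hw, ?_⟩⟩
          intro s
          rw [pvB_succ, hB s, hfm']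
          push Not at hwc
          by_cases hs : PySem.List.pyGetD (PySem.List.pyGetD mat s.1 []) s.2 0 > PySem.List.pyGetD r (pvFm r k) 0 ∨
              PySem.List.pyGetD (PySem.List.pyGetD mat s.1 []) s.2 0 = 0
          · rw [if_pos hs, if_neg ?_]
            rintro ⟨_, h | h⟩
            · exact hw (by simpa [hVfm] using h)
            · rw [hVfm, hcast] at h
              exact absurd (lt_of_le_of_lt hwc h) (lt_irrefl _)
          · rw [if_neg hs, if_neg ?_]
            push Not at hs
            obtain ⟨hle, hne⟩ := hs
            rintro ⟨_, h | h⟩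
            · exact hne h
            · rw [hcast] at h
              exact absurd (lt_of_le_of_lt (le_trans hle hwc) h) (lt_irrefl _)

theorem pv_row (mat : List (List Int)) (i : Int) (s : Int × Int) :
    pvB mat i (PySem.List.pyGetD mat i []) (PySem.List.pyGetD mat i []).length s =
      (let j := findmin_py (PySem.List.pyGetD mat i [])
       if PySem.List.pyGetD (PySem.List.pyGetD mat i []) j 0 = 0 then s
       else if PySem.List.pyGetD (PySem.List.pyGetD mat s.1 []) s.2 0 >
                 PySem.List.pyGetD (PySem.List.pyGetD mat i []) j 0 ∨
               PySem.List.pyGetD (PySem.List.pyGetD mat s.1 []) s.2 0 = 0 then (i, j)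
       else s) := by
  show pvB mat i (PySem.List.pyGetD mat i []) (PySem.List.pyGetD mat i []).length s =
      (if PySem.List.pyGetD (PySem.List.pyGetD mat i [])
            (findmin_py (PySem.List.pyGetD mat i [])) 0 = 0 then s
       else if PySem.List.pyGetD (PySem.List.pyGetD mat s.1 []) s.2 0 >
                 PySem.List.pyGetD (PySem.List.pyGetD mat i [])
                   (findmin_py (PySem.List.pyGetD mat i [])) 0 ∨
               PySem.List.pyGetD (PySem.List.pyGetD mat s.1 []) s.2 0 = 0
            then (i, findmin_py (PySem.List.pyGetD mat i []))
       else s)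
  have hfm_eq : findmin_py (PySem.List.pyGetD mat i []) =
      pvFm (PySem.List.pyGetD mat i []) (PySem.List.pyGetD mat i []).length := rfl
  set r := PySem.List.pyGetD mat i [] with hrdef
  by_cases hz : ∀ j : Nat, j < r.length → r.getD j 0 = 0
  · obtain ⟨hfm, hB⟩ := (pv_inv mat i r rfl r.length).2.1 hz
    have h0 : PySem.List.pyGetD r (0 : Int) 0 = 0 := by
      rw [PySem.List.pyGetD_zero]
      rcases Nat.eq_zero_or_pos r.length with hl | hl
      · simp [List.eq_nil_of_length_eq_zero hl]
      · exact hz 0 hl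
    rw [hB s, hfm_eq, hfm, if_pos h0]
  · obtain ⟨hw, hB⟩ := (pv_inv mat i r rfl r.length).2.2 hz
    rw [hB s, hfm_eq, if_neg hw]

theorem pv_foldl_ext {α β : Type} (f g : α → β → α) (h : ∀ a b, f a b = g a b)
    (l : List β) (a : α) : l.foldl f a = l.foldl g a := by
  induction l generalizing a with
  | nil => rfl
  | cons x xs ih => simp only [List.foldl_cons, h]; exact ih _

theorem pv_main (mat : List (List Int)) : findmatmin_py mat = findmatmin_py_alt mat := by
  unfold findmatmin_py findmatmin_py_alt
  refine pv_foldl_ext _ _ (fun s i => ?_) _ _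
  exact (pv_row mat i s).symm

-- ===== VERDICT (by name: the statement is the Claim_ definition above) =====
theorem findmatmin_py_spec : Claim_equal_findmatmin_py := by
  intro mat _ _
  unfold Spec_findmatmin_py
  exact pv_main mat
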